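-- pv_equiv track=rewrite | github.com/phschon/ultrabot | plugins/pr0gramm.py | _formatInfoMessage
-- ===== SOURCE A (Python) =====
-- def _formatInfoMessage(tags):
--     # no search tags provided
--     if not tags:
--         return 'Here\'s what I found:'
--     # search tags provided
--     else:
--         # 2 tags or more
--         if len(tags) > 2:
--             message = 'Here\'s what I found for '
--             message += "".join(["**%s**, " % tag for tag in  tags[:len(tags)-2]])
--             message += "**%s** and **%s**:" % (tags[len(tags)-2], tags[len(tags)-1])
--             return message
--         # 2 tags
--         elif len(tags) == 2:
--             return 'Here\'s what I found for **%s** and **%s**:' % (tags[0], tags[1])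
--         # 1 tag
--         else:
--             return 'Here\'s what I found for **%s**:' % tags[0]
-- ===== SOURCE B (Python) =====
-- def _formatInfoMessage(tags):
--     if not tags:
--         return 'Here\'s what I found:'
--     bolds = ['**%s**' % t for t in tags]
--     if len(tags) == 1:
--         body = bolds[0]
--     else:
--         body = ', '.join(bolds[:-1]) + ' and ' + bolds[-1]
--     return 'Here\'s what I found for ' + body + ':'
-- ===== Notes on version B (the rewrite author's own statement) =====
-- stated objective: simpler
-- what changed: Replaces A's three arity-specific hand-written templates (>2, ==2, ==1) with a single uniform English-list join over a bolded-tag list.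
import Mathlib
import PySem

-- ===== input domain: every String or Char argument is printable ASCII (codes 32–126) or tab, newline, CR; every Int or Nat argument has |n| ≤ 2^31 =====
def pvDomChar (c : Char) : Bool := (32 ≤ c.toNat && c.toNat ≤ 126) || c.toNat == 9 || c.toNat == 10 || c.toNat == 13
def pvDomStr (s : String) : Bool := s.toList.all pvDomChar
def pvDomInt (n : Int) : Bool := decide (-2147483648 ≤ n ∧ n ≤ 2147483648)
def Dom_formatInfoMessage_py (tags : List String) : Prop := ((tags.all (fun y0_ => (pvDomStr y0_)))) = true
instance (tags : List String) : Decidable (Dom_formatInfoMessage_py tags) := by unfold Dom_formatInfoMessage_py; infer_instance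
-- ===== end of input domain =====

-- B collapses A's three arity-specific templates into one uniform comma/"and" join over a bolded-tag list (simpler decomposition; same cost).


-- ===== PORT A =====
def formatInfoMessage_py (tags : List String) : String :=
  if tags = [] then "Here's what I found:"
  else if (tags.length : Int) > 2 then
    let message := "Here's what I found for "
    let message := message ++
      PySem.Str.join "" ((PySem.List.slice tags none (some ((tags.length : Int) - 2))).map
        (fun tag => "**" ++ tag ++ "**, "))
    message ++ ("**" ++ PySem.List.pyGetD tags ((tags.length : Int) - 2) "" ++ "** and **" ++
      PySem.List.pyGetD tags ((tags.length : Int) - 1) "" ++ "**:")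
  else if (tags.length : Int) = 2 then
    "Here's what I found for **" ++ PySem.List.pyGetD tags 0 "" ++ "** and **" ++
      PySem.List.pyGetD tags 1 "" ++ "**:"
  else
    "Here's what I found for **" ++ PySem.List.pyGetD tags 0 "" ++ "**:"

-- ===== PORT B =====
def formatInfoMessage_py_alt (tags : List String) : String :=
  if tags = [] then "Here's what I found:"
  else
    let bolds := tags.map (fun t => "**" ++ t ++ "**")
    let body :=
      if (tags.length : Int) = 1 then PySem.List.pyGetD bolds 0 ""
      else PySem.Str.join ", " (PySem.List.slice bolds none (some (-1))) ++ " and " ++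
        PySem.List.pyGetD bolds (-1) ""
    "Here's what I found for " ++ body ++ ":"

-- ===== PRECONDITION & SPEC =====
def Spec_formatInfoMessage_py (tags : List String) (out : String) : Prop := out = formatInfoMessage_py_alt tags
instance (tags : List String) (out : String) : Decidable (Spec_formatInfoMessage_py tags out) := by unfold Spec_formatInfoMessage_py; infer_instance

-- ===== CLAIM (what is proved, stated in full; the proofs are below) =====
def Claim_equal_formatInfoMessage_py : Prop := ∀ (tags : List String), Dom_formatInfoMessage_py tags → Spec_formatInfoMessage_py tags (formatInfoMessage_py tags)

-- ===== LEMMAS AND PROOFS =====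

theorem pv_interc_cons₂ (sep x y : List Char) (ys : List (List Char)) :
    sep.intercalate (x :: y :: ys) = x ++ sep ++ sep.intercalate (y :: ys) := by
  simp [List.intercalate]

theorem pv_interc_nil_sep (L : List (List Char)) : ([] : List Char).intercalate L = L.flatten := by
  induction L with
  | nil => simp [List.intercalate]
  | cons a L ih =>
    cases L with
    | nil => simp [List.intercalate]
    | cons b L => rw [pv_interc_cons₂]; simp_all

theorem pv_interc_append_singleton (sep : List Char) (L : List (List Char)) (P : List Char) :
    sep.intercalate (L ++ [P]) = (L.map (fun c => c ++ sep)).flatten ++ P := by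
  induction L with
  | nil => simp [List.intercalate]
  | cons a L ih =>
    cases L with
    | nil => simp [List.intercalate]
    | cons b L =>
      rw [List.cons_append, List.cons_append, pv_interc_cons₂, ← List.cons_append, ih]
      simp

-- ', '.join over 'map bold l ++ [bold p]' equals A's join of '"bold, "' pieces over l, then 'bold p'.
theorem pv_join_key (l : List String) (p : String) :
    PySem.Str.join ", " (l.map (fun t => "**" ++ t ++ "**") ++ ["**" ++ p ++ "**"]) =
    PySem.Str.join "" (l.map (fun t => "**" ++ t ++ "**, ")) ++ ("**" ++ p ++ "**") := by
  apply String.toList_inj.mp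
  simp [PySem.Str.join, PySem.Chars.join, pv_interc_nil_sep, List.map_map]
  rw [pv_interc_append_singleton]
  congr 1
  congr 1
  rw [List.map_map]
  apply List.map_congr_left
  intro t _
  simp

-- the >2-tag case, with the list decomposed as xs ++ [p, q], xs ≠ []
theorem pv_big (xs : List String) (hx : xs ≠ []) (p q : String) :
    formatInfoMessage_py (xs ++ [p, q]) = formatInfoMessage_py_alt (xs ++ [p, q]) := by
  have hxl : 0 < xs.length := List.length_pos_iff.mpr hx
  have hne : ¬ (xs ++ [p, q] = []) := by simp
  have hgt : ((xs ++ [p, q]).length : Int) > 2 := by simp; omega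
  have hnotone : ¬ (((xs ++ [p, q]).length : Int) = 1) := by simp; omega
  rw [formatInfoMessage_py, formatInfoMessage_py_alt]
  simp only [if_neg hne, if_pos hgt, if_neg hnotone]
  have h2 : ((xs ++ [p, q]).length : Int) - 2 = ((xs.length : Nat) : Int) := by simp
  have h1 : ((xs ++ [p, q]).length : Int) - 1 = (((xs.length + 1 : Nat)) : Int) := by simp; omega
  rw [h2, h1]
  rw [PySem.List.slice_to_natCast]
  rw [show (xs ++ [p, q]).take xs.length = xs from by
    simpa using List.take_left (l₁ := xs) (l₂ := [p, q])]
  rw [PySem.List.pyGetD_natCast, PySem.List.pyGetD_natCast]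
  rw [show (xs ++ [p, q]).getD xs.length "" = p from by simp [List.getD]]
  rw [show (xs ++ [p, q]).getD (xs.length + 1) "" = q from by simp [List.getD]]
  rw [show (xs ++ [p, q]).map (fun t => "**" ++ t ++ "**")
      = (xs.map (fun t => "**" ++ t ++ "**") ++ ["**" ++ p ++ "**"]) ++ ["**" ++ q ++ "**"] from by simp]
  rw [PySem.List.slice_to_neg_one, List.dropLast_concat, PySem.List.pyGetD_neg_one_append_singleton]
  rw [pv_join_key]
  apply String.toList_inj.mp
  simp

-- every list of length ≥ 3 splits as xs ++ [p, q] with xs ≠ []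
theorem pv_decomp (a b c : String) (t : List String) :
    ∃ xs p q, xs ≠ ([] : List String) ∧ a :: b :: c :: t = xs ++ [p, q] := by
  induction t generalizing a b c with
  | nil => exact ⟨[a], b, c, by simp, rfl⟩
  | cons d t ih =>
    obtain ⟨xs, p, q, hne, he⟩ := ih b c d
    exact ⟨a :: xs, p, q, by simp, by simp [he]⟩

-- ===== VERDICT (by name: the statement is the Claim_ definition above) =====
theorem formatInfoMessage_py_spec : Claim_equal_formatInfoMessage_py := by
  intro tags _
  show formatInfoMessage_py tags = formatInfoMessage_py_alt tags
  match tags with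
  | [] => rfl
  | [a] =>
    apply String.toList_inj.mp
    simp [formatInfoMessage_py, formatInfoMessage_py_alt, PySem.List.pyGetD, PySem.List.pyIdx?,
      PySem.List.pyGet?]
  | [a, b] =>
    apply String.toList_inj.mp
    simp [formatInfoMessage_py, formatInfoMessage_py_alt, PySem.List.pyGetD, PySem.List.pyIdx?,
      PySem.List.pyGet?, PySem.List.slice_to_neg_one, PySem.Str.join, PySem.Chars.join,
      List.intercalate]
  | a :: b :: c :: t =>
    obtain ⟨xs, p, q, hne, he⟩ := pv_decomp a b c t
    rw [he]
    exact pv_big xs hne p q
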